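-- pv_equiv track=rewrite | github.com/PucekPLZ/University-of-Wroclaw-Computer-Science | Materials/Introduction to Programming in Python/lista 8/zadanie3.py | ukladalne
-- ===== SOURCE A (Python) =====
-- from collections import defaultdict as dd
--
-- def slownikliter(slowo):
--     slownik = dd(lambda:"")
--
--     litery = []
--     slowo = slowo.lower()
--     for i in slowo:
--         if i != " ":
--             litery.append(i)
--
--     for i in range(len(slowo)):
--         if slowo[i] not in slownik and slowo[i] != " ":
--             slownik[slowo[i]] = litery.count(slowo[i])
--
--     return slownik
--
-- def ukladalne(slowo, slowo2):
--     litery = []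
--
--     for i in slowo:
--         litery.append(i)
--
--     for i in range(len(slowo)):
--         c = litery.count(slowo[i])
--
--         if slowo[i] in slownikliter(slowo2):
--             if c > slownikliter(slowo2)[slowo[i]]:
--                 return False
--         else:
--             return False
--
--     return True
-- ===== SOURCE B (Python) =====
-- def ukladalne(slowo, slowo2):
--     a = sorted(slowo)
--     b = sorted(c for c in slowo2.lower() if c != ' ')
--     j = 0
--     for x in a:
--         while j < len(b) and b[j] < x:
--             j += 1
--         if j == len(b) or b[j] != x:
--             return False
--         j += 1
--     return True
-- ===== Notes on version B (the rewrite author's own statement) =====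
-- stated objective: faster
-- what changed: Replaced the per-character membership/count check against a letter-count dictionary rebuilt from slowo2 at every loop step by sorting slowo's characters and the cleaned (lowercased, space-stripped) characters of slowo2 once and running a single two-pointer merge containment scan.
import Mathlib
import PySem

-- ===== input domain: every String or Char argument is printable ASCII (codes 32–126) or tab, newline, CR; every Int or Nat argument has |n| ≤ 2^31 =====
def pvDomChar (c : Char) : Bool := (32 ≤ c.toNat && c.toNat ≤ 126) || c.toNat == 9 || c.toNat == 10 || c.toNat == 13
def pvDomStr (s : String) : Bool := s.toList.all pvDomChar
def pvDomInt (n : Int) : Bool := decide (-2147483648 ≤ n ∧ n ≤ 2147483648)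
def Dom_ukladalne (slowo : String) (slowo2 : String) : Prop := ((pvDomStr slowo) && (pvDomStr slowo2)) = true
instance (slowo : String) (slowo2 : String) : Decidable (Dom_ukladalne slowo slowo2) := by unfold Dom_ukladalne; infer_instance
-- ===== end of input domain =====

-- B replaces A's per-character rebuilt dictionary-of-counts check by a sort-then-two-pointer
-- merge containment check (objective: faster).


-- ===== PORT A =====
-- slownikliter: lowercase the word, collect its non-space letters, then build a dict letter -> count
def slownikliter (slowo : String) : PySem.Dict Char Nat :=
  let sl := PySem.Chars.lower slowo.toList
  let litery := sl.foldl (fun acc i => if i != ' ' then acc ++ [i] else acc) []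
  (PySem.List.pyRange 0 (sl.length : Int) 1).foldl
    (fun d i =>
      let c := PySem.List.pyGetD sl i ' '
      if d.contains c = false ∧ c ≠ ' ' then d.insert c (PySem.List.count litery c) else d)
    PySem.Dict.empty

-- the main for-loop of A, with its early returns, as a recursion over the index list
def ukladalneLoop (slowo2 : String) (litery sl : List Char) : List Int → Bool
  | [] => true
  | i :: rest =>
    let ch := PySem.List.pyGetD sl i ' '
    let c := PySem.List.count litery ch
    if (slownikliter slowo2).contains ch then
      if c > (slownikliter slowo2).getD ch 0 then false
      else ukladalneLoop slowo2 litery sl rest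
    else false

def ukladalne (slowo : String) (slowo2 : String) : Bool :=
  let litery := slowo.toList.foldl (fun acc i => acc ++ [i]) []
  ukladalneLoop slowo2 litery slowo.toList
    (PySem.List.pyRange 0 (slowo.toList.length : Int) 1)

-- ===== PORT B =====
-- 'while j < len(b) and b[j] < x: j += 1' — the part of b from the advanced index j on
def ukAdvance (x : Char) : List Char → List Char
  | [] => []
  | y :: b => if y < x then ukAdvance x b else y :: b

-- B's for-loop over a with the moving index j into b, modelled by the remaining suffix of b
def ukMerge : List Char → List Char → Bool
  | [], _ => true
  | x :: a, b =>
    match ukAdvance x b with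
    | [] => false
    | y :: b' => if y != x then false else ukMerge a b'

def ukladalne_alt (slowo : String) (slowo2 : String) : Bool :=
  let a := PySem.List.sorted slowo.toList (fun c => c) false
  let b := PySem.List.sorted
    ((PySem.Chars.lower slowo2.toList).filter (fun c => c != ' ')) (fun c => c) false
  ukMerge a b

-- ===== PRECONDITION & SPEC =====
def Spec_ukladalne (slowo : String) (slowo2 : String) (out : Bool) : Prop := out = ukladalne_alt slowo slowo2
instance (slowo : String) (slowo2 : String) (out : Bool) : Decidable (Spec_ukladalne slowo slowo2 out) := by unfold Spec_ukladalne; infer_instance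

-- ===== CLAIM (what is proved, stated in full; the proofs are below) =====
def Claim_equal_ukladalne : Prop := ∀ (slowo : String) (slowo2 : String), Dom_ukladalne slowo slowo2 → Spec_ukladalne slowo slowo2 (ukladalne slowo slowo2)

-- ===== LEMMAS AND PROOFS =====

-- the cleaned letters of slowo2: lowercased, spaces removed
def ukClean (s : String) : List Char := (PySem.Chars.lower s.toList).filter (fun c => c != ' ')

-- the common characterization both programs are proved equivalent to:
-- every char of slowo occurs at least as often in the cleaned slowo2
def ukSpec (slowo slowo2 : String) : Prop :=
  ∀ ch ∈ slowo.toList, slowo.toList.count ch ≤ (ukClean slowo2).count ch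

theorem dictFold_get? (lit : List Char) (l : List Char) (d : PySem.Dict Char Nat) (ch : Char) :
    (l.foldl (fun d c => if d.contains c = false ∧ c ≠ ' ' then d.insert c (PySem.List.count lit c) else d) d).get? ch
    = ((d.get? ch).orElse (fun _ => if ch ≠ ' ' ∧ ch ∈ l then some (PySem.List.count lit ch) else none)) := by
  induction l generalizing d with
  | nil => simp
  | cons c l ih =>
    simp only [List.foldl_cons, ih]
    by_cases hc : d.contains c = false ∧ c ≠ ' '
    · simp only [if_pos hc]
      by_cases he : ch = c
      · subst he
        have hnone : d.get? ch = none := (PySem.Dict.get?_eq_none_iff_contains d ch).mpr hc.1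
        simp [hnone, hc.2]
      · rw [PySem.Dict.get?_insert]
        simp only [if_neg he]
        rcases h : d.get? ch with _ | v
        · simp [Option.orElse, he, List.mem_cons]
        · simp [Option.orElse]
    · simp only [if_neg hc]
      rcases h : d.get? ch with _ | v
      · by_cases hsp : ch = ' '
        · simp [Option.orElse, hsp]
        · by_cases he : ch = c
          · subst he
            have : d.contains ch = true := by
              by_contra hcc
              exact hc ⟨by simpa using hcc, hsp⟩
            rw [PySem.Dict.contains_eq_isSome_get?, h] at this; simp at this
          · simp [Option.orElse, he, List.mem_cons]
      · simp [Option.orElse]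

theorem slownikliter_get? (s : String) (ch : Char) :
    (slownikliter s).get? ch =
      if ch ∈ ukClean s then some ((ukClean s).count ch) else none := by
  unfold slownikliter
  simp only [PySem.List.foldl_append_if_eq_filter, List.nil_append]
  have h := PySem.List.foldl_pyRange_zero_pyGetD' (PySem.Chars.lower s.toList) ' '
        (fun d c => if d.contains c = false ∧ c ≠ ' '
          then d.insert c (PySem.List.count ((PySem.Chars.lower s.toList).filter (fun i => i != ' ')) c) else d)
        PySem.Dict.empty
  simp only [h, dictFold_get?]
  simp only [PySem.Dict.get?_empty, Option.orElse, ukClean]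
  by_cases hm : ch ∈ (PySem.Chars.lower s.toList).filter (fun c => c != ' ')
  · have := List.mem_filter.mp hm
    simp only [if_pos hm]
    rw [if_pos ⟨by simpa using this.2, this.1⟩]
    simp [PySem.List.count_eq]
  · simp only [if_neg hm]
    rw [if_neg]
    intro ⟨h1, h2⟩
    exact hm (List.mem_filter.mpr ⟨h2, by simpa using h1⟩)

theorem ukladalneLoop_iff (s2 : String) (lit sl : List Char) (idxs : List Int) :
    ukladalneLoop s2 lit sl idxs = true ↔
      ∀ i ∈ idxs, PySem.List.pyGetD sl i ' ' ∈ ukClean s2 ∧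
        PySem.List.count lit (PySem.List.pyGetD sl i ' ') ≤ (ukClean s2).count (PySem.List.pyGetD sl i ' ') := by
  induction idxs with
  | nil => simp [ukladalneLoop]
  | cons i rest ih =>
    simp only [ukladalneLoop]
    by_cases hm : PySem.List.pyGetD sl i ' ' ∈ ukClean s2
    · have hc : (slownikliter s2).contains (PySem.List.pyGetD sl i ' ') = true := by
        rw [PySem.Dict.contains_eq_isSome_get?, slownikliter_get?, if_pos hm]; rfl
      have hd : (slownikliter s2).getD (PySem.List.pyGetD sl i ' ') 0 = (ukClean s2).count (PySem.List.pyGetD sl i ' ') := by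
        rw [PySem.Dict.getD_eq_get?_getD, slownikliter_get?, if_pos hm]; rfl
      rw [if_pos hc, hd]
      by_cases hgt : PySem.List.count lit (PySem.List.pyGetD sl i ' ') > (ukClean s2).count (PySem.List.pyGetD sl i ' ')
      · rw [if_pos hgt]
        simp only [List.mem_cons]
        constructor
        · intro h; exact absurd h (by simp)
        · intro h
          have := (h i (Or.inl rfl)).2
          omega
      · rw [if_neg hgt, ih]
        simp only [List.mem_cons]
        constructor
        · rintro h j (rfl | hj)
          · exact ⟨hm, by omega⟩
          · exact h j hj
        · intro h j hj; exact h j (Or.inr hj)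
    · have hc : (slownikliter s2).contains (PySem.List.pyGetD sl i ' ') = false := by
        rw [PySem.Dict.contains_eq_isSome_get?, slownikliter_get?, if_neg hm]; rfl
      rw [if_neg (by simp [hc])]
      simp only [List.mem_cons]
      constructor
      · intro h; exact absurd h (by simp)
      · intro h; exact absurd (h i (Or.inl rfl)).1 hm

theorem ukladalne_iff (slowo slowo2 : String) :
    ukladalne slowo slowo2 = true ↔ ukSpec slowo slowo2 := by
  unfold ukladalne ukSpec
  simp only [PySem.List.foldl_append_singleton_eq_self, List.nil_append]
  rw [ukladalneLoop_iff]
  constructor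
  · intro h ch hch
    obtain ⟨k, hk, rfl⟩ := List.mem_iff_getElem.mp hch
    have hi : ((k : Int)) ∈ PySem.List.pyRange 0 (slowo.toList.length : Int) 1 := by
      rw [PySem.List.mem_pyRange_one]
      constructor <;> [exact Int.natCast_nonneg k; exact_mod_cast hk]
    have h2 := h (k : Int) hi
    rw [PySem.List.pyGetD_natCast, List.getD_eq_getElem _ _ hk] at h2
    simpa [PySem.List.count_eq] using h2.2
  · intro h i hi
    rw [PySem.List.mem_pyRange_one] at hi
    have hk : i.toNat < slowo.toList.length := by omega
    have hi' : i = ((i.toNat : Nat) : Int) := by omega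
    rw [hi', PySem.List.pyGetD_natCast, List.getD_eq_getElem _ _ hk]
    have hch : slowo.toList[i.toNat] ∈ slowo.toList := List.getElem_mem _
    have hcount := h _ hch
    have hpos : 0 < slowo.toList.count slowo.toList[i.toNat] := List.count_pos_iff.mpr hch
    refine ⟨?_, by simpa [PySem.List.count_eq] using hcount⟩
    have : 0 < (ukClean slowo2).count slowo.toList[i.toNat] := by omega
    exact List.count_pos_iff.mp this

theorem ukAdvance_eq_dropWhile (x : Char) (b : List Char) :
    ukAdvance x b = b.dropWhile (fun y => decide (y < x)) := by
  induction b with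
  | nil => rfl
  | cons y b ih =>
    simp only [ukAdvance, List.dropWhile_cons, decide_eq_true_eq]
    split_ifs with h
    · exact ih
    · rfl

theorem ukAdvance_count (x ch : Char) (b : List Char) (hx : x ≤ ch) :
    (ukAdvance x b).count ch = b.count ch := by
  rw [ukAdvance_eq_dropWhile]
  conv_rhs => rw [← List.takeWhile_append_dropWhile (p := fun y => decide (y < x)) (l := b)]
  rw [List.count_append]
  have hz : (b.takeWhile (fun y => decide (y < x))).count ch = 0 := by
    rw [List.count_eq_zero]
    intro hmem
    have := List.mem_takeWhile_imp hmem
    simp only [decide_eq_true_eq] at this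
    exact absurd this (not_lt.mpr hx)
  omega

theorem ukAdvance_sorted (x : Char) (b : List Char) (hb : b.Pairwise (· ≤ ·)) :
    (ukAdvance x b).Pairwise (· ≤ ·) := by
  rw [ukAdvance_eq_dropWhile]
  exact hb.sublist (List.dropWhile_sublist _)

theorem ukAdvance_head (x y : Char) (b b' : List Char) (h : ukAdvance x b = y :: b') : x ≤ y := by
  induction b with
  | nil => simp [ukAdvance] at h
  | cons z b ih =>
    simp only [ukAdvance] at h
    split_ifs at h with hz
    · exact ih h
    · cases h; exact not_lt.mp hz

theorem ukMerge_iff (a b : List Char) (ha : a.Pairwise (· ≤ ·)) (hb : b.Pairwise (· ≤ ·)) :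
    ukMerge a b = true ↔ ∀ ch ∈ a, a.count ch ≤ b.count ch := by
  induction a generalizing b with
  | nil => simp [ukMerge]
  | cons x a ih =>
    obtain ⟨hxa, ha'⟩ := List.pairwise_cons.mp ha
    cases hdb : ukAdvance x b with
    | nil =>
      simp only [ukMerge, hdb]
      constructor
      · intro h; exact absurd h (by simp)
      · intro h
        have hbx : b.count x = 0 := by
          rw [← ukAdvance_count x x b le_rfl, hdb]; rfl
        have := h x (List.mem_cons_self)
        rw [List.count_cons_self, hbx] at this
        omega
    | cons y b' =>
      have hxy : x ≤ y := ukAdvance_head x y b b' hdb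
      have hsorted : (y :: b').Pairwise (· ≤ ·) := hdb ▸ ukAdvance_sorted x b hb
      obtain ⟨hyb', hb'⟩ := List.pairwise_cons.mp hsorted
      by_cases hyx : y = x
      · subst hyx
        simp only [ukMerge, hdb, bne_self_eq_false, Bool.false_eq_true, if_false]
        rw [ih b' ha' hb']
        have hcount : ∀ ch, y ≤ ch → b.count ch = (y :: b').count ch := by
          intro ch hch; rw [← ukAdvance_count y ch b hch, hdb]
        constructor
        · intro h ch hch
          have hych : y ≤ ch := by
            rcases List.mem_cons.mp hch with rfl | hm
            · exact le_rfl
            · exact hxa ch hm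
          rw [hcount ch hych]
          by_cases hcy : ch = y
          · subst hcy
            rw [List.count_cons_self, List.count_cons_self]
            by_cases hya : ch ∈ a
            · have := h ch hya; omega
            · rw [List.count_eq_zero.mpr hya]; omega
          · rcases List.mem_cons.mp hch with rfl | hm
            · exact absurd rfl hcy
            · have h2 := h ch hm
              simpa [List.count_cons, hcy] using h2
        · intro h ch hch
          have hych := hxa ch hch
          have h2 := h ch (List.mem_cons_of_mem _ hch)
          rw [hcount ch hych] at h2
          by_cases hcy : ch = y
          · subst hcy
            rw [List.count_cons_self, List.count_cons_self] at h2; omega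
          · simpa [List.count_cons, hcy] using h2
      · have hxy' : x < y := lt_of_le_of_ne hxy (fun h => hyx h.symm)
        simp only [ukMerge, hdb, if_pos (bne_iff_ne.mpr hyx)]
        constructor
        · intro h; exact absurd h (by simp)
        · intro h
          have hbx : b.count x = (y :: b').count x := by
            rw [← ukAdvance_count x x b le_rfl, hdb]
          have hx0 : (y :: b').count x = 0 := by
            rw [List.count_eq_zero]
            intro hmem
            rcases List.mem_cons.mp hmem with rfl | hm
            · exact absurd rfl hyx
            · exact absurd (lt_of_lt_of_le hxy' (hyb' x hm)) (lt_irrefl x)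
          have := h x List.mem_cons_self
          rw [List.count_cons_self, hbx, hx0] at this
          omega

theorem ukladalne_alt_iff (slowo slowo2 : String) :
    ukladalne_alt slowo slowo2 = true ↔ ukSpec slowo slowo2 := by
  unfold ukladalne_alt ukSpec
  have hA : (PySem.List.sorted slowo.toList (fun c => c) false).Pairwise (· ≤ ·) := by
    simpa using PySem.List.sorted_pairwise slowo.toList (fun c => c)
  have hB : (PySem.List.sorted (ukClean slowo2) (fun c => c) false).Pairwise (· ≤ ·) := by
    simpa using PySem.List.sorted_pairwise (ukClean slowo2) (fun c => c)
  have hpA := PySem.List.sorted_perm slowo.toList (fun c => c) false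
  have hpB := PySem.List.sorted_perm (ukClean slowo2) (fun c => c) false
  rw [show ((PySem.Chars.lower slowo2.toList).filter (fun c => c != ' ')) = ukClean slowo2 from rfl]
  rw [ukMerge_iff _ _ hA hB]
  constructor
  · intro h ch hch
    have := h ch (hpA.mem_iff.mpr hch)
    rwa [hpA.count_eq, hpB.count_eq] at this
  · intro h ch hch
    rw [hpA.count_eq, hpB.count_eq]
    exact h ch (hpA.mem_iff.mp hch)

-- ===== VERDICT (by name: the statement is the Claim_ definition above) =====
theorem ukladalne_spec : Claim_equal_ukladalne := by
  intro slowo slowo2 _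
  unfold Spec_ukladalne
  rw [Bool.eq_iff_iff, ukladalne_iff, ukladalne_alt_iff]
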